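-- pv_equiv track=rewrite | github.com/yps1978/yps1978 | dev/strings/minimum_length_substrings.py | substr_in_string
-- ===== SOURCE A (Python) =====
-- def substr_in_string(sub_str, str_val):
--     lookup_str = str_val
--     for i in range(len(sub_str)):
--         index = lookup_str.find(sub_str[i])
--         if index < 0:
--             return False
--         else:
--             lookup_str = lookup_str[:index] + lookup_str[index+1:]
--
--     return True
-- ===== SOURCE B (Python) =====
-- def substr_in_string(sub_str, str_val):
--     need = {}
--     for ch in sub_str:
--         need[ch] = need.get(ch, 0) + 1
--     have = {}
--     for ch in str_val:
--         have[ch] = have.get(ch, 0) + 1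
--     for ch, n in need.items():
--         if have.get(ch, 0) < n:
--             return False
--     return True
-- ===== Notes on version B (the rewrite author's own statement) =====
-- stated objective: faster
-- what changed: Replaces A's repeated find-and-rebuild scan of str_val (one linear search plus string reconstruction per character of sub_str) with two frequency dictionaries built in one pass each, then a single comparison of the counts.
import Mathlib
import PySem

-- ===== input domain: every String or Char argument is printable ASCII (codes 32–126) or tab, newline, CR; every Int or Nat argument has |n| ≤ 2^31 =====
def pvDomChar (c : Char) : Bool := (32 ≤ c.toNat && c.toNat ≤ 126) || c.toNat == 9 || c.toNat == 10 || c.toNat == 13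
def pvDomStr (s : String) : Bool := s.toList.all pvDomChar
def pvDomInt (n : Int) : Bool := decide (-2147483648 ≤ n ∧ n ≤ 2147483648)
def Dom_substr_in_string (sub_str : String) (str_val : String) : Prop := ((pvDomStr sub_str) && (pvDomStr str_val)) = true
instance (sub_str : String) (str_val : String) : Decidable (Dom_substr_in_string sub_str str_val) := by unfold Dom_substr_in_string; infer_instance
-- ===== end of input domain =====

-- B replaces A's per-character find-and-rebuild scan of str_val with two one-pass
-- frequency dictionaries compared once (objective: faster, O(n+m) vs O(n*m)).

-- ===== PORT A =====
-- the 'for i in range(len(sub_str))' loop with its early 'return False';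
-- lookup_str[:index] + lookup_str[index+1:] is the two slices appended
def substr_in_string_goA (sub : List Char) (idxs : List Int) (look : List Char) : Bool :=
  match idxs with
  | [] => true
  | i :: rest =>
      let index := PySem.Chars.find look [PySem.List.pyGetD sub i ' ']
      if index < 0 then false
      else substr_in_string_goA sub rest
             (PySem.List.slice look none (some index) ++ PySem.List.slice look (some (index + 1)) none)

def substr_in_string (sub_str : String) (str_val : String) : Bool :=
  substr_in_string_goA sub_str.toList
    (PySem.List.pyRange 0 (PySem.Str.len sub_str) 1) str_val.toList

-- ===== PORT B =====
def substr_in_string_alt (sub_str : String) (str_val : String) : Bool :=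
  let need := sub_str.toList.foldl
    (fun d ch => d.insert ch (d.getD ch 0 + 1)) (PySem.Dict.empty : PySem.Dict Char Int)
  let haveD := str_val.toList.foldl
    (fun d ch => d.insert ch (d.getD ch 0 + 1)) (PySem.Dict.empty : PySem.Dict Char Int)
  -- 'for ch, n in need.items(): if have.get(ch, 0) < n: return False' / 'return True'
  need.items.all (fun p => !(haveD.getD p.1 0 < p.2))

-- ===== PRECONDITION & SPEC =====
def Spec_substr_in_string (sub_str : String) (str_val : String) (out : Bool) : Prop := out = substr_in_string_alt sub_str str_val
instance (sub_str : String) (str_val : String) (out : Bool) : Decidable (Spec_substr_in_string sub_str str_val out) := by unfold Spec_substr_in_string; infer_instance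

-- ===== CLAIM (what is proved, stated in full; the proofs are below) =====
def Claim_equal_substr_in_string : Prop := ∀ (sub_str : String) (str_val : String), Dom_substr_in_string sub_str str_val → Spec_substr_in_string sub_str str_val (substr_in_string sub_str str_val)

-- ===== LEMMAS AND PROOFS =====

-- A's loop, with the consumed prefix of sub_str dropped and the first-occurrence
-- deletion written as List.erase
def pvMloop : List Char → List Char → Bool
  | [], _ => true
  | c :: cs, look => if c ∈ look then pvMloop cs (look.erase c) else false

theorem pv_find_singleton_neg (look : List Char) (c : Char) :
    PySem.Chars.find look [c] < 0 ↔ c ∉ look := by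
  constructor
  · intro h hc
    have hlb := PySem.Chars.neg_one_le_find look [c]
    have := (PySem.Chars.find_eq_neg_one_iff (s := look) (sub := [c])).mp (by omega)
    exact this ((List.singleton_infix_iff c look).mpr hc)
  · intro h
    have := (PySem.Chars.find_eq_neg_one_iff (s := look) (sub := [c])).mpr
      (fun hin => h ((List.singleton_infix_iff c look).mp hin))
    omega

theorem pv_erase_eq_take_drop (look : List Char) (c : Char) (n : Nat)
    (h1 : look[n]? = some c) (h2 : ∀ i, i < n → look[i]? ≠ some c) :
    look.take n ++ look.drop (n + 1) = look.erase c := by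
  induction look generalizing n with
  | nil => simp at h1
  | cons x xs ih =>
    cases n with
    | zero =>
      simp at h1
      simp [h1]
    | succ m =>
      have hx : ¬ (x = c) := by
        intro hxc
        exact h2 0 (Nat.succ_pos m) (by simp [hxc])
      simp only [List.getElem?_cons_succ] at h1
      have hrec : xs.take m ++ xs.drop (m + 1) = xs.erase c :=
        ih m h1 (fun i hi => h2 (i + 1) (by omega) ∘ by simp)
      have hbeq : (x == c) = false := by simpa using hx
      simp [hbeq, List.take_succ_cons, List.drop_succ_cons, hrec]

theorem pv_stepA (look : List Char) (c : Char) (h : 0 ≤ PySem.Chars.find look [c]) :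
    PySem.List.slice look none (some (PySem.Chars.find look [c])) ++
      PySem.List.slice look (some (PySem.Chars.find look [c] + 1)) none = look.erase c := by
  obtain ⟨hpre, hmin⟩ := PySem.Chars.find_spec (s := look) (sub := [c]) h
  set n := (PySem.Chars.find look [c]).toNat with hn
  rw [PySem.List.slice_to look h, PySem.List.slice_from look (by omega)]
  have hx : (PySem.Chars.find look [c] + 1).toNat = n + 1 := by omega
  rw [hx]
  apply pv_erase_eq_take_drop
  · rcases hpre with ⟨t, ht⟩
    have hdn : List.drop n look = c :: t := by simpa using ht.symm
    have := congrArg List.head? hdn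
    simpa [List.head?_drop] using this
  · intro i hi hcontra
    apply hmin i hi
    have hlen : i < look.length := by
      rcases List.getElem?_eq_some_iff.mp hcontra with ⟨h', _⟩; exact h'
    have hgi : look[i] = c := by
      rcases List.getElem?_eq_some_iff.mp hcontra with ⟨_, h'⟩; exact h'
    refine ⟨look.drop (i + 1), ?_⟩
    simpa [hgi] using List.getElem_cons_drop hlen

theorem pv_goA_eq_mloop (sub : List Char) (look : List Char) (k : Nat) :
    substr_in_string_goA sub (PySem.List.pyRange (k : Int) (sub.length : Int) 1) look
      = pvMloop (sub.drop k) look := by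
  by_cases hk : sub.length ≤ k
  · rw [PySem.List.pyRange_one_eq_nil (by exact_mod_cast hk), List.drop_eq_nil_of_le hk]
    rfl
  · replace hk : k < sub.length := by omega
    rw [PySem.List.pyRange_one_cons (by exact_mod_cast hk)]
    have hdrop : sub.drop k = sub[k] :: sub.drop (k + 1) := (List.getElem_cons_drop hk).symm
    rw [hdrop]
    show (if PySem.Chars.find look [PySem.List.pyGetD sub (k : Int) ' '] < 0 then false
          else _) = _
    rw [PySem.List.pyGetD_natCast, List.getD_eq_getElem _ _ hk]
    simp only [pvMloop]
    by_cases hmem : sub[k] ∈ look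
    · rw [if_neg (by simpa [pv_find_singleton_neg] using hmem), if_pos hmem]
      have hfind : 0 ≤ PySem.Chars.find look [sub[k]] := by
        by_contra h
        exact (pv_find_singleton_neg look sub[k]).mp (by omega) hmem
      rw [pv_stepA look sub[k] hfind]
      have := pv_goA_eq_mloop sub (look.erase sub[k]) (k + 1)
      simpa using this
    · rw [if_pos ((pv_find_singleton_neg look _).mpr hmem), if_neg hmem]
termination_by sub.length - k

theorem pv_mloop_iff (cs look : List Char) :
    pvMloop cs look = true ↔ ∀ c, cs.count c ≤ look.count c := by
  induction cs generalizing look with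
  | nil => simp [pvMloop]
  | cons c cs ih =>
    simp only [pvMloop]
    by_cases hmem : c ∈ look
    · rw [if_pos hmem, ih]
      have hc1 : 1 ≤ look.count c := List.one_le_count_iff.mpr hmem
      constructor
      · intro h d
        have hd := h d
        rw [List.count_erase] at hd
        rw [List.count_cons]
        rcases eq_or_ne c d with rfl | hdc
        · simp at hd ⊢; omega
        · simp [hdc, beq_iff_eq] at hd ⊢; omega
      · intro h d
        have hd := h d
        rw [List.count_cons] at hd
        rw [List.count_erase]
        rcases eq_or_ne c d with rfl | hdc
        · simp at hd ⊢; omega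
        · simp [hdc, beq_iff_eq] at hd ⊢; omega
    · rw [if_neg hmem]
      constructor
      · intro h; exact absurd h (by simp)
      · intro h
        have h0 : look.count c = 0 := List.count_eq_zero_of_not_mem hmem
        have h1 : (c :: cs).count c = cs.count c + 1 := List.count_cons_self ..
        exact absurd (h c) (by omega)

theorem pv_A_iff (sub_str str_val : String) :
    substr_in_string sub_str str_val = true ↔
      ∀ c, sub_str.toList.count c ≤ str_val.toList.count c := by
  unfold substr_in_string
  rw [show PySem.Str.len sub_str = (sub_str.toList.length : Int) from by
        simp [PySem.Str.len_eq],
      show (0 : Int) = ((0 : Nat) : Int) from rfl,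
      pv_goA_eq_mloop, List.drop_zero, pv_mloop_iff]

theorem pv_B_iff (sub_str str_val : String) :
    substr_in_string_alt sub_str str_val = true ↔
      ∀ c, sub_str.toList.count c ≤ str_val.toList.count c := by
  have halt : substr_in_string_alt sub_str str_val
      = (PySem.Dict.counter sub_str.toList).items.all
          (fun p => !((PySem.Dict.counter str_val.toList).getD p.1 0 < p.2)) := rfl
  rw [halt, PySem.Dict.items_counter]
  simp only [List.all_map, List.all_eq_true, Function.comp, PySem.Dict.getD_counter,
    Bool.not_eq_eq_eq_not, Bool.not_true, decide_eq_false_iff_not, not_lt]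
  constructor
  · intro h c
    by_cases hc : c ∈ sub_str.toList
    · have := h c (by simpa [PySem.Set.mem_ofList] using hc)
      exact_mod_cast this
    · simp [List.count_eq_zero_of_not_mem hc]
  · intro h c _
    exact_mod_cast h c


-- ===== VERDICT (by name: the statement is the Claim_ definition above) =====
theorem substr_in_string_spec : Claim_equal_substr_in_string := by
  intro sub_str str_val _
  unfold Spec_substr_in_string
  have hA := pv_A_iff sub_str str_val
  have hB := pv_B_iff sub_str str_val
  rw [Bool.eq_iff_iff, hA, hB]
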